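-- pv_equiv track=rewrite | github.com/markobogoevski/ChessDetection | improved_neural_chessboard/LiveChess2FEN/custom_board_detection.py | create_move_orientation_mapper
-- ===== SOURCE A (Python) =====
-- def create_move_orientation_mapper(total_number_of_moves):
--     images_per_orientation = 5  # 5 from each side
--     orientation_order = ['front', 'left', 'behind', 'right']
--     number_orientations = len(orientation_order)
--     number_of_whole_sets_of_rotations = total_number_of_moves // (images_per_orientation * number_orientations)
--     remainder_set_rotations = total_number_of_moves % (images_per_orientation * number_orientations)
--     final_mapper = dict()
--     for whole_set_number in range(number_of_whole_sets_of_rotations):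
--         for orientation_index in range(number_orientations):
--             orientation = orientation_order[orientation_index]
--             orientation_list = [whole_set_number * images_per_orientation * number_orientations
--                                 + orientation_index * images_per_orientation + move_no
--                                 for move_no in range(0, images_per_orientation)]
--             for move in orientation_list:
--                 final_mapper[move] = orientation
--
--     # Now to deal with the remainders
--     moves_left = remainder_set_rotations
--     orientations_left = moves_left // images_per_orientation
--     for orientation_index in range(orientations_left):  # Still full orientations
--         orientation = orientation_order[orientation_index]
--         orientation_list = [number_of_whole_sets_of_rotations * images_per_orientation * number_orientations
--                             + orientation_index * images_per_orientation + move_no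
--                             for move_no in range(0, images_per_orientation)]
--         for move in orientation_list:
--             final_mapper[move] = orientation
--
--     moves_left -= orientations_left * images_per_orientation
--
--     remaining_orientation_index = orientations_left
--     orientation_list = [number_of_whole_sets_of_rotations * images_per_orientation * number_orientations
--                         + remaining_orientation_index * images_per_orientation + move_no
--                         for move_no in range(0, moves_left + 1)]
--     for move in orientation_list:
--         final_mapper[move] = orientation_order[remaining_orientation_index]
--
--     return final_mapper
-- ===== SOURCE B (Python) =====
-- def create_move_orientation_mapper(total_number_of_moves):
--     orientation_order = ['front', 'left', 'behind', 'right']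
--     return {move: orientation_order[(move // 5) % 4]
--             for move in range(total_number_of_moves + 1)}
-- ===== Notes on version B (the rewrite author's own statement) =====
-- stated objective: simpler
-- what changed: Replaces the three staged loop phases (whole rotation sets, full leftover orientations, final partial orientation) with a single dict comprehension assigning each index its orientation by the closed form orientation_order[(move // 5) % 4].
-- intended difference: For negative total_number_of_moves A returns a nonempty dict over a negative key range ending at total (an artefact of its floor-division and remainder bookkeeping), while B returns the empty dict, the intended mapping when there are no moves. — e.g. on create_move_orientation_mapper(-20): A returns [(-20, "front")], B returns []
import Mathlib
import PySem

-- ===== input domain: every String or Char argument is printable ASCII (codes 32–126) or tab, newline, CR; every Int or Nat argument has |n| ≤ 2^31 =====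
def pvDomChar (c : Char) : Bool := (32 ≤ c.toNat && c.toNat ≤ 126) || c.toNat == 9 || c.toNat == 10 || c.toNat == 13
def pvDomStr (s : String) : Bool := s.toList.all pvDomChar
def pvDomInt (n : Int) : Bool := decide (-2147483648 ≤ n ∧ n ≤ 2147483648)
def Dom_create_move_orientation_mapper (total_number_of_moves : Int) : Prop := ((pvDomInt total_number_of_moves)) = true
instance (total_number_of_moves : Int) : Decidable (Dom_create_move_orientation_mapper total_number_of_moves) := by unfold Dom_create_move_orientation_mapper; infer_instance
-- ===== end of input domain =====

-- B replaces A's three staged loop phases with one comprehension assigning each index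
-- orientation_order[(i // 5) % 4]; simpler decomposition, same value for
-- total ≥ 0, and the natural empty mapping (instead of A's negative-keyed artefact) for total < 0.

-- ===== PORT A =====
-- literal transliteration of A; list indexing orientation_order[...] is ported as
-- pyGetD with default "" — exact here because every index used is in range 0..3.
def create_move_orientation_mapper (total_number_of_moves : Int) : List (Int × String) :=
  let images_per_orientation : Int := 5
  let orientation_order : List String := ["front", "left", "behind", "right"]
  let number_orientations : Int := PySem.List.len orientation_order
  let number_of_whole_sets_of_rotations :=
    PySem.Int.floordiv total_number_of_moves (images_per_orientation * number_orientations)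
  let remainder_set_rotations :=
    PySem.Int.mod total_number_of_moves (images_per_orientation * number_orientations)
  let final_mapper : PySem.Dict Int String := PySem.Dict.empty
  let final_mapper :=
    (PySem.List.pyRange 0 number_of_whole_sets_of_rotations 1).foldl (fun d whole_set_number =>
      (PySem.List.pyRange 0 number_orientations 1).foldl (fun d orientation_index =>
        let orientation := PySem.List.pyGetD orientation_order orientation_index ""
        let orientation_list := (PySem.List.pyRange 0 images_per_orientation 1).map
          (fun move_no => whole_set_number * images_per_orientation * number_orientations
            + orientation_index * images_per_orientation + move_no)
        orientation_list.foldl (fun d move => d.insert move orientation) d) d) final_mapper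
  -- Now to deal with the remainders
  let moves_left := remainder_set_rotations
  let orientations_left := PySem.Int.floordiv moves_left images_per_orientation
  let final_mapper :=
    (PySem.List.pyRange 0 orientations_left 1).foldl (fun d orientation_index =>
      let orientation := PySem.List.pyGetD orientation_order orientation_index ""
      let orientation_list := (PySem.List.pyRange 0 images_per_orientation 1).map
        (fun move_no => number_of_whole_sets_of_rotations * images_per_orientation * number_orientations
          + orientation_index * images_per_orientation + move_no)
      orientation_list.foldl (fun d move => d.insert move orientation) d) final_mapper
  let moves_left := moves_left - orientations_left * images_per_orientation
  let remaining_orientation_index := orientations_left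
  let orientation_list := (PySem.List.pyRange 0 (moves_left + 1) 1).map
    (fun move_no => number_of_whole_sets_of_rotations * images_per_orientation * number_orientations
      + remaining_orientation_index * images_per_orientation + move_no)
  let final_mapper := orientation_list.foldl
    (fun d move => d.insert move (PySem.List.pyGetD orientation_order remaining_orientation_index ""))
    final_mapper
  final_mapper.items

-- ===== PORT B =====
def create_move_orientation_mapper_alt (total_number_of_moves : Int) : List (Int × String) :=
  let orientation_order : List String := ["front", "left", "behind", "right"]
  ((PySem.List.pyRange 0 (total_number_of_moves + 1) 1).foldl (fun (d : PySem.Dict Int String) move =>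
      d.insert move (PySem.List.pyGetD orientation_order
        (PySem.Int.mod (PySem.Int.floordiv move 5) 4) "")) PySem.Dict.empty).items

-- ===== PRECONDITION & SPEC =====
-- For negative total_number_of_moves A returns a nonempty dict over a negative key range ending
-- at total (an artefact of its floor-division and remainder bookkeeping), while B returns the
-- empty dict, the intended mapping when there are no moves.
def D_create_move_orientation_mapper (total_number_of_moves : Int) : Prop := total_number_of_moves < 0
instance (total_number_of_moves : Int) : Decidable (D_create_move_orientation_mapper total_number_of_moves) := by unfold D_create_move_orientation_mapper; infer_instance
def Spec_create_move_orientation_mapper (total_number_of_moves : Int) (out : List (Int × String)) : Prop := ¬ D_create_move_orientation_mapper total_number_of_moves → out = create_move_orientation_mapper_alt total_number_of_moves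
instance (total_number_of_moves : Int) (out : List (Int × String)) : Decidable (Spec_create_move_orientation_mapper total_number_of_moves out) := by unfold Spec_create_move_orientation_mapper; infer_instance
def pvDiffWitness_create_move_orientation_mapper : Int := -20
def pvDiffWitnessOut_create_move_orientation_mapper : (List (Int × String)) × (List (Int × String)) := ([(-20, "front")], [])

-- ===== CLAIM (what is proved, stated in full; the proofs are below) =====
def Claim_unchanged_create_move_orientation_mapper : Prop := ∀ (total_number_of_moves : Int), Dom_create_move_orientation_mapper total_number_of_moves → Spec_create_move_orientation_mapper total_number_of_moves (create_move_orientation_mapper total_number_of_moves)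
def Claim_changed_create_move_orientation_mapper : Prop := Dom_create_move_orientation_mapper (pvDiffWitness_create_move_orientation_mapper) ∧ D_create_move_orientation_mapper (pvDiffWitness_create_move_orientation_mapper) ∧ create_move_orientation_mapper (pvDiffWitness_create_move_orientation_mapper) = pvDiffWitnessOut_create_move_orientation_mapper.1 ∧ create_move_orientation_mapper_alt (pvDiffWitness_create_move_orientation_mapper) = pvDiffWitnessOut_create_move_orientation_mapper.2 ∧ pvDiffWitnessOut_create_move_orientation_mapper.1 ≠ pvDiffWitnessOut_create_move_orientation_mapper.2

-- ===== LEMMAS AND PROOFS =====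

-- the closed-form orientation B assigns to index i
def pvPhi (i : Int) : String :=
  PySem.List.pyGetD ["front", "left", "behind", "right"]
    (PySem.Int.mod (PySem.Int.floordiv i 5) 4) ""

-- the pair list A's three phases fold into the dict, as one expression
def pvPairs (t : Int) : List (Int × String) :=
  (PySem.List.pyRange 0 (20 * PySem.Int.floordiv t 20) 1
    ++ PySem.List.pyRange (20 * PySem.Int.floordiv t 20) (t + 1) 1).map
    (fun k => (k, pvPhi k))

theorem pv_fold_pairs (l : List Int) (kf : Int → Int) (c : String) (d : PySem.Dict Int String) :
    l.foldl (fun d m => d.insert (kf m) c) d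
    = (l.map (fun m => (kf m, c))).foldl (fun d p => d.insert p.1 p.2) d := by
  rw [List.foldl_map]

theorem pv_foldl_flatMap {α β γ : Type} (l : List α) (g : α → List β)
    (F : γ → β → γ) (i : γ) :
    (l.flatMap g).foldl F i = l.foldl (fun a j => (g j).foldl F a) i := by
  induction l generalizing i with
  | nil => rfl
  | cons x xs ih => simp [List.foldl_append, ih]

theorem pv_flatMap_congr {α β : Type} (l : List α) (f g : α → List β)
    (h : ∀ x ∈ l, f x = g x) : l.flatMap f = l.flatMap g := by
  induction l with
  | nil => rfl
  | cons x xs ih =>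
    simp only [List.flatMap_cons, h x (List.mem_cons_self),
      ih (fun y hy => h y (List.mem_cons_of_mem x hy))]

theorem pv_map_add_pyRange (a n : Int) :
    (PySem.List.pyRange 0 n 1).map (fun m => a + m) = PySem.List.pyRange a (a + n) 1 := by
  rw [PySem.List.pyRange_one, PySem.List.pyRange_one]
  simp [List.map_map]

theorem pv_phi_block (k w oi m : Int) (hk : k = w * 5 * 4 + oi * 5 + m)
    (h0 : 0 ≤ oi) (h4 : oi < 4) (hm0 : 0 ≤ m) (hm5 : m < 5) :
    pvPhi k = PySem.List.pyGetD ["front", "left", "behind", "right"] oi "" := by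
  subst hk
  unfold pvPhi
  rw [PySem.Int.floordiv_eq_ediv_of_pos (by norm_num), PySem.Int.mod_eq_emod_of_pos (by norm_num)]
  congr 1
  omega

-- one run of A's inner comprehension, rewritten as a range of keys paired with pvPhi
theorem pv_block' (w oi n : Int) (h0 : 0 ≤ oi) (h4 : oi < 4) (hn : n ≤ 5) :
    (PySem.List.pyRange 0 n 1).map
      (fun m => (w * 5 * 4 + oi * 5 + m, PySem.List.pyGetD ["front", "left", "behind", "right"] oi ""))
    = (PySem.List.pyRange (w * 5 * 4 + oi * 5) (w * 5 * 4 + oi * 5 + n) 1).map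
        (fun k => (k, pvPhi k)) := by
  rw [← pv_map_add_pyRange (w * 5 * 4 + oi * 5) n, List.map_map]
  apply List.map_congr_left
  intro m hm
  rw [PySem.List.mem_pyRange_one] at hm
  simp only [Function.comp]
  congr 1
  exact (pv_phi_block _ w oi m rfl h0 h4 hm.1 (by omega)).symm

theorem pv_flat_blocks (c a : Int) (hc : 0 < c) : ∀ (n : Nat),
    (PySem.List.pyRange 0 (n : Int) 1).flatMap
      (fun j => PySem.List.pyRange (a + c * j) (a + c * j + c) 1)
      = PySem.List.pyRange a (a + c * n) 1 := by
  intro n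
  induction n with
  | zero => simp [PySem.List.pyRange_one_eq_nil]
  | succ k ih =>
    have hck : (0:Int) ≤ c * k := by positivity
    rw [show ((k + 1 : Nat) : Int) = (k : Int) + 1 by push_cast; ring,
        PySem.List.pyRange_one_succ_right (by positivity), List.flatMap_append, ih]
    simp only [List.flatMap_cons, List.flatMap_nil, List.append_nil]
    rw [show a + c * ((k : Nat) : Int) + c = a + c * ((k : Int) + 1) by ring]
    rw [PySem.List.pyRange_one_append a (a + c * k) (a + c * ((k:Int) + 1))
          (by linarith) (by nlinarith)]

-- generic: n consecutive blocks of width c starting at a, any syntactic shape of the bounds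
theorem pv_flat_blocks' (c a n : Int) (hc : 0 < c) (hn : 0 ≤ n)
    (lo hi : Int → Int) (hlo : ∀ j, lo j = a + c * j) (hhi : ∀ j, hi j = a + c * j + c)
    (a' b : Int) (ha' : a' = a) (hb : b = a + c * n) :
    (PySem.List.pyRange 0 n 1).flatMap (fun j => PySem.List.pyRange (lo j) (hi j) 1)
      = PySem.List.pyRange a' b 1 := by
  obtain ⟨m, rfl⟩ : ∃ m : Nat, n = (m : Int) := ⟨n.toNat, (Int.toNat_of_nonneg hn).symm⟩
  rw [pv_flatMap_congr _ _ (fun j => PySem.List.pyRange (a + c * j) (a + c * j + c) 1)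
        (fun j _ => by rw [hlo, hhi]), pv_flat_blocks c a hc m, ha', hb]

-- A's inner loop over the four orientations of one whole set
theorem pv_inner (w : Int) :
    (PySem.List.pyRange 0 4 1).flatMap
      (fun oi => (PySem.List.pyRange 0 5 1).map
        (fun m => (w * 5 * 4 + oi * 5 + m, PySem.List.pyGetD ["front", "left", "behind", "right"] oi "")))
    = (PySem.List.pyRange (w * 5 * 4) (w * 5 * 4 + 5 * 4) 1).map (fun k => (k, pvPhi k)) := by
  rw [pv_flatMap_congr _ _
        (fun oi => (PySem.List.pyRange (w * 5 * 4 + oi * 5) (w * 5 * 4 + oi * 5 + 5) 1).map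
          (fun k => (k, pvPhi k)))
        (fun oi hoi => by
          rw [PySem.List.mem_pyRange_one] at hoi
          exact pv_block' w oi 5 hoi.1 hoi.2 le_rfl)]
  rw [← List.map_flatMap]
  congr 1
  exact pv_flat_blocks' 5 (w * 5 * 4) 4 (by norm_num) (by norm_num) _ _
    (fun j => by ring) (fun j => by ring) _ _ rfl (by ring)

-- A's outer loop over the whole sets
theorem pv_whole (q : Int) :
    (PySem.List.pyRange 0 q 1).flatMap
      (fun w => (PySem.List.pyRange (w * 5 * 4) (w * 5 * 4 + 5 * 4) 1).map (fun k => (k, pvPhi k)))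
    = (PySem.List.pyRange 0 (20 * q) 1).map (fun k => (k, pvPhi k)) := by
  rcases lt_or_ge q 0 with h | h
  · rw [PySem.List.pyRange_one_eq_nil h.le, PySem.List.pyRange_one_eq_nil (by omega : 20 * q ≤ 0)]
    rfl
  · rw [← List.map_flatMap]
    congr 1
    exact pv_flat_blocks' 20 0 q (by norm_num) h _ _
      (fun j => by ring) (fun j => by ring) _ _ (by ring) (by ring)

theorem pv_a_items (t : Int) :
    create_move_orientation_mapper t
    = ((pvPairs t).foldl (fun (d : PySem.Dict Int String) p => d.insert p.1 p.2)
        PySem.Dict.empty).items := by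
  unfold create_move_orientation_mapper
  simp only [show PySem.List.len ["front", "left", "behind", "right"] = 4 from by decide]
  norm_num
  simp only [List.foldl_map]
  simp only [pv_fold_pairs]
  simp only [← pv_foldl_flatMap]
  simp only [← List.foldl_append]
  congr 1
  rw [pv_flatMap_congr _ _ _ (fun j _ => pv_inner j), pv_whole (t / 20)]
  rw [pv_flatMap_congr _ _
        (fun j => (PySem.List.pyRange (t / 20 * 5 * 4 + j * 5) (t / 20 * 5 * 4 + j * 5 + 5) 1).map
          (fun k => (k, pvPhi k)))
        (fun j hj => by
          rw [PySem.List.mem_pyRange_one] at hj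
          exact pv_block' (t / 20) j 5 hj.1 (by omega) le_rfl)]
  rw [← List.map_flatMap]
  rw [pv_flat_blocks' 5 (t / 20 * 5 * 4) (t % 20 / 5) (by norm_num) (by omega) _ _
        (fun j => by ring) (fun j => by ring) (20 * (t / 20)) (t / 20 * 5 * 4 + t % 20 / 5 * 5)
        (by ring) (by ring)]
  rw [pv_block' (t / 20) (t % 20 / 5) (t % 20 - t % 20 / 5 * 5 + 1) (by omega) (by omega) (by omega)]
  rw [← List.map_append, ← List.map_append]
  unfold pvPairs
  rw [show PySem.Int.floordiv t 20 = t / 20 from PySem.Int.floordiv_eq_ediv_of_pos (by norm_num)]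
  congr 1
  rw [show t / 20 * 5 * 4 + t % 20 / 5 * 5 + (t % 20 - t % 20 / 5 * 5 + 1) = t + 1 from by omega,
      List.append_assoc,
      ← PySem.List.pyRange_one_append (20 * (t / 20)) (t / 20 * 5 * 4 + t % 20 / 5 * 5) (t + 1)
        (by omega) (by omega)]

-- for t ≥ 0 B's single range is exactly pvPairs t folded into the dict
theorem pv_b_items (t : Int) (ht : 0 ≤ t) :
    create_move_orientation_mapper_alt t
    = ((pvPairs t).foldl (fun (d : PySem.Dict Int String) p => d.insert p.1 p.2)
        PySem.Dict.empty).items := by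
  unfold create_move_orientation_mapper_alt pvPairs
  rw [← PySem.List.pyRange_one_append 0 (20 * PySem.Int.floordiv t 20) (t + 1)
        (by rw [PySem.Int.floordiv_eq_ediv_of_pos (by norm_num)]; omega)
        (by rw [PySem.Int.floordiv_eq_ediv_of_pos (by norm_num)]; omega)]
  rw [List.foldl_map]
  rfl

-- ===== VERDICT (by name: the statement is the Claim_ definition above) =====
theorem create_move_orientation_mapper_spec : Claim_unchanged_create_move_orientation_mapper := by
  intro t _ hD
  unfold D_create_move_orientation_mapper at hD
  rw [pv_a_items, pv_b_items t (by omega)]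

theorem create_move_orientation_mapper_changed : Claim_changed_create_move_orientation_mapper := by
  unfold Claim_changed_create_move_orientation_mapper; decide
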